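-- pv_equiv track=rewrite | github.com/benquick123/code-profiling | code/batch-1/vse-naloge-brez-testov/DN5-M-98.py | se_poznata
-- ===== SOURCE A (Python) =====
-- def unikati(s):
--     seznam = []
--     for i in s:
--         if i not in seznam:
--             seznam.append(i)
--     return seznam
--
-- def avtor(tvit):
--     a = tvit.split()
--     b = a[0]
--     c = b[:-1]
--     return c
--
-- def izloci_besedo(beseda):
--     for i in range(len(beseda) - 1):
--         if beseda[i].isalnum():
--             break
--
--     for j in range(len(beseda)-1, 0, -1):
--         if beseda[j].isalnum():
--             break
--     beseda = beseda[i:j + 1]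
--     return beseda
--
-- def se_zacne_z(tvit, c):
--     besede = tvit.split()
--     seznam_besed = []
--     for b in besede:
--         if b[0] == c:
--             seznam_besed.append(izloci_besedo(b))
--     return seznam_besed
--
-- def se_poznata(tviti, oseba1, oseba2):
--     for i in tviti:
--         avtor_t = avtor(i)
--         omenjeni = se_zacne_z(i, "@")
--         if omenjeni:
--             osebe = []
--             osebe = osebe + omenjeni
--             osebe.append(avtor_t)
--             if oseba1 in unikati(osebe) and oseba2 in unikati(osebe):
--                 return True
--     else:
--         return False
-- ===== SOURCE B (Python) =====
-- # B: incremental inverted index -- for each tweet (in order) the same author/mention parsing as A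
-- # feeds a dict mapping each person to the set of tweet indices it appears in; after a tweet with
-- # mentions is indexed, we return True as soon as the two posting sets intersect.
-- def _izloci(beseda):
--     # A's trimming rule kept verbatim: first/last alnum scan with Python's leftover loop index
--     for i in range(len(beseda) - 1):
--         if beseda[i].isalnum():
--             break
--     for j in range(len(beseda) - 1, 0, -1):
--         if beseda[j].isalnum():
--             break
--     return beseda[i:j + 1]
--
-- def se_poznata(tviti, oseba1, oseba2):
--     index = {}
--     for t, tvit in enumerate(tviti):
--         besede = tvit.split()
--         avtor = besede[0][:-1]
--         omenjeni = [_izloci(b) for b in besede if b[0] == "@"]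
--         if omenjeni:
--             for oseba in omenjeni + [avtor]:
--                 index.setdefault(oseba, set()).add(t)
--             if index.get(oseba1, set()) & index.get(oseba2, set()):
--                 return True
--     return False
-- ===== Notes on version B (the rewrite author's own statement) =====
-- stated objective: alternative
-- what changed: Replaces A's per-tweet 'are both persons in this tweet's deduplicated list' membership check by an incrementally built inverted index mapping each person to the set of indices of tweets it appears in, answering True as soon as the two posting sets intersect; the word parsing/trimming rules are kept.
-- outside the precondition, e.g. on se_poznata(['ana: @bo', ' '], 'bo', 'ana'): A returns True, B returns True
import Mathlib
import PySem

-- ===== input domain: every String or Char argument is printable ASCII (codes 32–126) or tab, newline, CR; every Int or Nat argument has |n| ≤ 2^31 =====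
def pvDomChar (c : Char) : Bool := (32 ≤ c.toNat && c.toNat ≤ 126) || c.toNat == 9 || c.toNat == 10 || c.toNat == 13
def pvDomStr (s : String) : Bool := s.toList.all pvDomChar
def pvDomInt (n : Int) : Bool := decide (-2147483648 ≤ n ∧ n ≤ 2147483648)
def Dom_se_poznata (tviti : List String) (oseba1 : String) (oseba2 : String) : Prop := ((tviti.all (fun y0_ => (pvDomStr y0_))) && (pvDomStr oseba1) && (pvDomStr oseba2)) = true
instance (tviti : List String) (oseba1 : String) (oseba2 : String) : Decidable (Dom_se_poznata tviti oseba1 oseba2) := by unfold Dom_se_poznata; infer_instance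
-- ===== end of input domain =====

-- B replaces A's per-tweet membership check by an incrementally built inverted index (person ->
-- set of tweet indices), returning True as soon as the two posting sets intersect; alternative
-- decomposition, not claimed faster.


-- ===== PORT A =====
def unikati (s : List String) : List String :=
  s.foldl (fun seznam i => if i ∈ seznam then seznam else seznam ++ [i]) []

def avtor (tvit : String) : String :=
  let a := PySem.Str.split₀ tvit
  let b := (PySem.List.pyGet? a 0).getD ""   -- a[0]; the IndexError case (empty split) is excluded by Pre_
  PySem.Str.slice b none (some (-1))         -- b[:-1]

-- a 'for … if …: break' loop over indices, carrying Python's leftover loop variable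
def izlociBrk (cs : List Char) : List Int → Int → Int
  | [], i => i
  | k :: ks, _ =>
    if PySem.Chars.isalnum (PySem.List.pyGetD cs k ' ') then k else izlociBrk cs ks k

def izloci_besedo (beseda : String) : String :=
  let cs := beseda.toList
  let n : Int := PySem.List.len cs
  -- init 0 stands for Python's unbound i/j (only reachable for the word "@", excluded by Pre_)
  let i := izlociBrk cs (PySem.List.pyRange 0 (n - 1) 1) 0
  let j := izlociBrk cs (PySem.List.pyRange (n - 1) 0 (-1)) 0
  String.ofList (PySem.List.slice cs (some i) (some (j + 1)))

def se_zacne_z (tvit : String) (c : Char) : List String :=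
  let besede := PySem.Str.split₀ tvit
  besede.foldl (fun seznam_besed b =>
    if PySem.List.pyGetD b.toList 0 ' ' == c then seznam_besed ++ [izloci_besedo b]
    else seznam_besed) []

def se_poznata : List String → String → String → Bool
  | [], _, _ => false
  | i :: tl, oseba1, oseba2 =>
    let avtor_t := avtor i
    let omenjeni := se_zacne_z i '@'
    if omenjeni ≠ [] then
      let osebe := ([] : List String) ++ omenjeni ++ [avtor_t]
      if (unikati osebe).contains oseba1 && (unikati osebe).contains oseba2 then true
      else se_poznata tl oseba1 oseba2
    else se_poznata tl oseba1 oseba2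

-- ===== PORT B =====
-- Source B's break-loop over indices (same trimming rule as A, kept verbatim in B)
def obreziBrk (cs : List Char) : List Int → Int → Int
  | [], i => i
  | k :: ks, _ =>
    if PySem.Chars.isalnum (PySem.List.pyGetD cs k ' ') then k else obreziBrk cs ks k

def obrezi_alt (beseda : String) : String :=
  let cs := beseda.toList
  let n : Int := PySem.List.len cs
  -- init 0 stands for Python's unbound i/j (only reachable for the word "@", excluded by Pre_)
  let i := obreziBrk cs (PySem.List.pyRange 0 (n - 1) 1) 0
  let j := obreziBrk cs (PySem.List.pyRange (n - 1) 0 (-1)) 0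
  String.ofList (PySem.List.slice cs (some i) (some (j + 1)))

-- the for-loop of Source B: state = the inverted index; early return when the posting sets intersect
def se_poznata_alt_loop (oseba1 oseba2 : String) :
    List (Int × String) → PySem.Dict String (PySem.Set Int) → Bool
  | [], _ => false
  | (t, tvit) :: rest, index =>
    let besede := PySem.Str.split₀ tvit
    let avtor_t := PySem.Str.slice ((PySem.List.pyGet? besede 0).getD "") none (some (-1))
    let omenjeni := (besede.filter (fun b => PySem.List.pyGetD b.toList 0 ' ' == '@')).map obrezi_alt
    if omenjeni ≠ [] then
      let index' := (omenjeni ++ [avtor_t]).foldl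
        (fun d oseba => d.modify oseba PySem.Set.empty (fun s => PySem.Set.add s t)) index
      if !(PySem.Set.inter (index'.getD oseba1 PySem.Set.empty)
            (index'.getD oseba2 PySem.Set.empty)).isEmpty then true
      else se_poznata_alt_loop oseba1 oseba2 rest index'
    else se_poznata_alt_loop oseba1 oseba2 rest index

def se_poznata_alt (tviti : List String) (oseba1 : String) (oseba2 : String) : Bool :=
  se_poznata_alt_loop oseba1 oseba2 (PySem.List.enumerate tviti) PySem.Dict.empty

-- ===== PRECONDITION & SPEC =====
-- Pre_ excludes inputs containing a malformed tweet (one with no words, or with a bare "@" word):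
-- A raises IndexError/UnboundLocalError on reaching such a tweet, except when an earlier tweet
-- already mentions both persons, where A and B both stop at that tweet and return True (see the
-- claim's cite); that returning region is not expressible without re-running the parse.
def Pre_se_poznata (tviti : List String) (oseba1 : String) (oseba2 : String) : Prop :=
  ∀ t ∈ tviti, PySem.Str.split₀ t ≠ [] ∧ "@" ∉ PySem.Str.split₀ t

instance (tviti : List String) (oseba1 : String) (oseba2 : String) : Decidable (Pre_se_poznata tviti oseba1 oseba2) := by
  unfold Pre_se_poznata; infer_instance

def pvWitness_se_poznata : List String × String × String := (["ana: @bo zivjo"], "bo", "ana")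

def Spec_se_poznata (tviti : List String) (oseba1 : String) (oseba2 : String) (out : Bool) : Prop := out = se_poznata_alt tviti oseba1 oseba2
instance (tviti : List String) (oseba1 : String) (oseba2 : String) (out : Bool) : Decidable (Spec_se_poznata tviti oseba1 oseba2 out) := by unfold Spec_se_poznata; infer_instance

-- ===== CLAIM (what is proved, stated in full; the proofs are below) =====
def Claim_equal_se_poznata : Prop := ∀ (tviti : List String) (oseba1 : String) (oseba2 : String), Dom_se_poznata tviti oseba1 oseba2 → Pre_se_poznata tviti oseba1 oseba2 → Spec_se_poznata tviti oseba1 oseba2 (se_poznata tviti oseba1 oseba2)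

-- ===== LEMMAS AND PROOFS =====

theorem obreziBrk_eq (cs : List Char) (l : List Int) (init : Int) :
    obreziBrk cs l init = izlociBrk cs l init := by
  induction l generalizing init with
  | nil => rfl
  | cons k ks ih => rw [obreziBrk, izlociBrk]; split <;> simp [ih]

-- the two word-trimming helpers agree on every word
theorem obrezi_eq (b : String) : obrezi_alt b = izloci_besedo b := by
  simp only [obrezi_alt, izloci_besedo, obreziBrk_eq]

theorem unikati_eq (l : List String) : unikati l = PySem.Set.ofList l := by
  rw [PySem.Set.ofList_eq_foldl, unikati]
  congr 1
  funext s i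
  rw [PySem.Set.add_eq_ite]

theorem se_zacne_z_eq (tvit : String) (c : Char) :
    se_zacne_z tvit c =
      ((PySem.Str.split₀ tvit).filter (fun b => PySem.List.pyGetD b.toList 0 ' ' == c)).map
        izloci_besedo := by
  unfold se_zacne_z
  rw [PySem.List.foldl_append_if]
  simp

-- B-side parse of one tweet: its mention list and its person list (mentions + author)
def mentionsOf (tvit : String) : List String :=
  ((PySem.Str.split₀ tvit).filter (fun b => PySem.List.pyGetD b.toList 0 ' ' == '@')).map obrezi_alt

def peopleOf (tvit : String) : List String :=
  mentionsOf tvit ++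
    [PySem.Str.slice ((PySem.List.pyGet? (PySem.Str.split₀ tvit) 0).getD "") none (some (-1))]

-- the per-tweet "both are known here" test
def coBool (oseba1 oseba2 : String) (tvit : String) : Bool :=
  (mentionsOf tvit ≠ []) && (oseba1 ∈ peopleOf tvit) && (oseba2 ∈ peopleOf tvit)

theorem se_poznata_eq_any (tviti : List String) (oseba1 oseba2 : String) :
    se_poznata tviti oseba1 oseba2 = tviti.any (coBool oseba1 oseba2) := by
  induction tviti with
  | nil => simp [se_poznata]
  | cons t tl ih =>
    rw [se_poznata, List.any_cons, ← ih]
    have hom : se_zacne_z t '@' = mentionsOf t := by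
      rw [se_zacne_z_eq, mentionsOf]
      exact (List.map_congr_left fun b _ => obrezi_eq b).symm
    have havt : avtor t =
        PySem.Str.slice ((PySem.List.pyGet? (PySem.Str.split₀ t) 0).getD "") none (some (-1)) := rfl
    simp only [coBool, hom]
    set r := se_poznata tl oseba1 oseba2
    by_cases hne : mentionsOf t = []
    · simp [hne]
    · simp only [hne, ne_eq, not_false_eq_true, if_true, decide_true, Bool.true_and,
        List.nil_append, havt, unikati_eq]
      by_cases h1 : oseba1 ∈ peopleOf t <;> by_cases h2 : oseba2 ∈ peopleOf t <;>
        simp [peopleOf, PySem.Set.mem_ofList] at *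

theorem mem_person_fold (persons : List String) (t : Int) (d : PySem.Dict String (PySem.Set Int))
    (o : String) (x : Int) :
    (x ∈ (persons.foldl (fun d oseba => d.modify oseba PySem.Set.empty (fun s => PySem.Set.add s t)) d).getD o PySem.Set.empty) ↔
      x ∈ d.getD o PySem.Set.empty ∨ (o ∈ persons ∧ x = t) := by
  induction persons generalizing d with
  | nil => simp
  | cons p ps ih =>
    rw [List.foldl_cons, ih]
    rw [PySem.Dict.getD_modify]
    by_cases hop : o = p
    · subst hop
      simp [PySem.Set.mem_add]
      try tauto
    · simp [hop]
      try tauto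

-- the loop invariant: every recorded index is below the next enumeration index, and the two
-- posting sets are still disjoint; then the loop decides 'any coBool' of the remaining tweets
theorem alt_loop_eq_any (oseba1 oseba2 : String) (tl : List String) (start : Int)
    (d : PySem.Dict String (PySem.Set Int))
    (hlt : ∀ o x, x ∈ d.getD o PySem.Set.empty → x < start)
    (hdisj : ∀ x, x ∈ d.getD oseba1 PySem.Set.empty → x ∉ d.getD oseba2 PySem.Set.empty) :
    se_poznata_alt_loop oseba1 oseba2 (PySem.List.enumerate tl start) d =
      tl.any (coBool oseba1 oseba2) := by
  induction tl generalizing start d with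
  | nil => simp [PySem.List.enumerate_nil, se_poznata_alt_loop]
  | cons tv rest ih =>
    rw [PySem.List.enumerate_cons, se_poznata_alt_loop, List.any_cons]
    have hm : (List.filter (fun b => PySem.List.pyGetD b.toList 0 ' ' == '@')
        (PySem.Str.split₀ tv)).map obrezi_alt = mentionsOf tv := rfl
    simp only [hm]
    by_cases hne : mentionsOf tv = []
    · rw [if_neg (by simp [hne])]
      rw [ih (start + 1) d (fun o x hx => lt_trans (hlt o x hx) (by omega)) hdisj]
      simp [coBool, hne]
    · rw [if_pos (by simpa using hne)]
      set av := PySem.Str.slice ((PySem.List.pyGet? (PySem.Str.split₀ tv) 0).getD "") none (some (-1)) with hav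
      set d' := (mentionsOf tv ++ [av]).foldl
        (fun d oseba => d.modify oseba PySem.Set.empty (fun s => PySem.Set.add s start)) d with hd'
      have hmem : ∀ o x, (x ∈ d'.getD o PySem.Set.empty) ↔
          x ∈ d.getD o PySem.Set.empty ∨ (o ∈ peopleOf tv ∧ x = start) := by
        intro o x; rw [hd', mem_person_fold]; rfl
      by_cases hco : (oseba1 ∈ peopleOf tv) ∧ (oseba2 ∈ peopleOf tv)
      · have hin : start ∈ PySem.Set.inter (d'.getD oseba1 PySem.Set.empty) (d'.getD oseba2 PySem.Set.empty) := by
          rw [PySem.Set.mem_inter, hmem, hmem]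
          exact ⟨Or.inr ⟨hco.1, rfl⟩, Or.inr ⟨hco.2, rfl⟩⟩
        rw [if_pos (by simpa [List.isEmpty_iff] using List.ne_nil_of_mem hin)]
        simp [coBool, hne, hco.1, hco.2]
      · have hempty : PySem.Set.inter (d'.getD oseba1 PySem.Set.empty) (d'.getD oseba2 PySem.Set.empty) = [] := by
          apply List.eq_nil_iff_forall_not_mem.mpr
          intro x hx
          rw [PySem.Set.mem_inter, hmem, hmem] at hx
          obtain ⟨h1, h2⟩ := hx
          rcases h1 with h1 | ⟨hp1, rfl⟩
          · rcases h2 with h2 | ⟨hp2, hx2⟩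
            · exact hdisj x h1 h2
            · exact absurd (hlt _ _ h1) (by omega)
          · rcases h2 with h2 | ⟨hp2, _⟩
            · exact absurd (hlt _ _ h2) (by omega)
            · exact hco ⟨hp1, hp2⟩
        rw [if_neg (by simp; exact hempty)]
        rw [ih (start + 1) d' ?_ ?_]
        · have hcoB : coBool oseba1 oseba2 tv = false := by
            simp only [coBool, Bool.and_eq_false_iff]
            rcases (not_and_or.mp hco) with h | h
            · exact Or.inl (Or.inr (by simpa using h))
            · exact Or.inr (by simpa using h)
          rw [hcoB, Bool.false_or]
        · intro o x hx
          rw [hmem] at hx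
          rcases hx with hx | ⟨_, rfl⟩
          · exact lt_trans (hlt o x hx) (by omega)
          · omega
        · intro x hx1 hx2
          have : x ∈ PySem.Set.inter (d'.getD oseba1 PySem.Set.empty) (d'.getD oseba2 PySem.Set.empty) := by
            rw [PySem.Set.mem_inter]; exact ⟨hx1, hx2⟩
          rw [hempty] at this
          exact absurd this (List.not_mem_nil)

theorem alt_eq_any (tviti : List String) (oseba1 oseba2 : String) :
    se_poznata_alt tviti oseba1 oseba2 = tviti.any (coBool oseba1 oseba2) := by
  unfold se_poznata_alt
  exact alt_loop_eq_any oseba1 oseba2 tviti 0 PySem.Dict.empty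
    (by intro o x hx; simp [PySem.Dict.getD_empty, PySem.Set.empty] at hx)
    (by intro x hx; simp [PySem.Dict.getD_empty, PySem.Set.empty] at hx)

-- ===== VERDICT (by name: the statement is the Claim_ definition above) =====
theorem se_poznata_spec : Claim_equal_se_poznata := by
  intro tviti oseba1 oseba2 _hdom _hpre
  unfold Spec_se_poznata
  rw [se_poznata_eq_any, alt_eq_any]
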